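-- pv_equiv track=rewrite | github.com/agh-bit-academy/SummerProject2022 | WDI/Zestaw_2/Zadanie_04/sol.py | f
-- ===== SOURCE A (Python) =====
-- def f(n):
--     variable = 0
--     for i in range(1, n + 1):
--         flag = True
--         help_var = i
--         while help_var != 1:
--             if help_var % 2 == 0:
--                 help_var //= 2
--                 continue
--             if help_var % 3 == 0:
--                 help_var //= 3
--                 continue
--             if help_var % 5 == 0:
--                 help_var //= 5
--                 continue
--             flag = 0
--             break
--         if flag:
--             variable += 1
--     return variable
-- ===== SOURCE B (Python) =====
-- def f(n):
--     # Count 5-smooth numbers in 1..n by enumerating products 2^a * 3^b * 5^c <= n.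
--     count = 0
--     p2 = 1
--     while p2 <= n:
--         p3 = p2
--         while p3 <= n:
--             p5 = p3
--             while p5 <= n:
--                 count += 1
--                 p5 *= 5
--             p3 *= 3
--         p2 *= 2
--     return count
-- ===== Notes on version B (the rewrite author's own statement) =====
-- stated objective: faster
-- what changed: Instead of testing every candidate in the range for smoothness by repeated division, B enumerates the smooth numbers themselves as products of powers of two, three and five with a triple loop, counting each product below the bound once.
import Mathlib
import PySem

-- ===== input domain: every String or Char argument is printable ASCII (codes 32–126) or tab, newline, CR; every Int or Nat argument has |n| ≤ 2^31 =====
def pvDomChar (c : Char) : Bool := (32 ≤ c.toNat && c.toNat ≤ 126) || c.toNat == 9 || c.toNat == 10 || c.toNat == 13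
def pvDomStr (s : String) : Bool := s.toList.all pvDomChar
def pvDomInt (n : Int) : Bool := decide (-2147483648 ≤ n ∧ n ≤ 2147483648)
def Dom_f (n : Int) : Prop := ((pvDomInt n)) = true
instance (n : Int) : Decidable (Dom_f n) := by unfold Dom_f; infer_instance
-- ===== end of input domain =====

-- B counts the 5-smooth numbers in 1..n by enumerating products 2^a*3^b*5^c ≤ n
-- with a triple loop over the powers, instead of A's per-i divisibility test (faster: asymptotic).

-- ===== PORT A =====
-- A's inner while loop on help_var.  Every i produced by range(1, n+1) is ≥ 1, where Python's
-- // and % on ints coincide with Nat division/mod, so the loop is ported on Nat.  The fuel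
-- argument (called with fuel = h, an upper bound on the number of halvings/thirdings/fifthings)
-- only makes the recursion structural; it is never exhausted on the inputs f passes in.
def loopA (fuel : Nat) (h : Nat) : Bool :=
  match fuel with
  | 0 => true
  | fuel + 1 =>
    if h ≤ 1 then true                       -- while help_var != 1 (h = 0 is unreachable from i ≥ 1)
    else if h % 2 = 0 then loopA fuel (h / 2)
    else if h % 3 = 0 then loopA fuel (h / 3)
    else if h % 5 = 0 then loopA fuel (h / 5)
    else false                               -- flag = 0; break

def f (n : Int) : Int :=
  (PySem.List.pyRange 1 (n + 1) 1).foldl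
    (fun acc i => if loopA i.toNat i.toNat then acc + 1 else acc) 0

-- ===== PORT B =====
-- The three while loops of Source B, innermost first.  Fuel (= n.toNat + 1, an upper bound on the
-- number of iterations, since p at least doubles/triples/quintuples starting from ≥ 1) only
-- makes each loop structural; it is never exhausted.
def loop5 (fuel : Nat) (n p acc : Int) : Int :=
  match fuel with
  | 0 => acc
  | fuel + 1 => if p ≤ n then loop5 fuel n (5 * p) (acc + 1) else acc

def loop3 (fuel : Nat) (n p acc : Int) : Int :=
  match fuel with
  | 0 => acc
  | fuel + 1 => if p ≤ n then loop3 fuel n (3 * p) (loop5 (n.toNat + 1) n p acc) else acc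

def loop2 (fuel : Nat) (n p acc : Int) : Int :=
  match fuel with
  | 0 => acc
  | fuel + 1 => if p ≤ n then loop2 fuel n (2 * p) (loop3 (n.toNat + 1) n p acc) else acc

def f_alt (n : Int) : Int := loop2 (n.toNat + 1) n 1 0

-- ===== PRECONDITION & SPEC =====
def Spec_f (n : Int) (out : Int) : Prop := out = f_alt n
instance (n : Int) (out : Int) : Decidable (Spec_f n out) := by unfold Spec_f; infer_instance

-- ===== CLAIM (what is proved, stated in full; the proofs are below) =====
def Claim_equal_f : Prop := ∀ (n : Int), Dom_f n → Spec_f n (f n)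

-- ===== LEMMAS AND PROOFS =====

-- ---- arithmetic helpers ----
theorem not_two_dvd (b c : ℕ) : ¬ 2 ∣ 3^b * 5^c := by
  intro h
  rcases (Nat.prime_two.dvd_mul).1 h with h' | h'
  · exact absurd (Nat.Prime.dvd_of_dvd_pow Nat.prime_two h') (by norm_num)
  · exact absurd (Nat.Prime.dvd_of_dvd_pow Nat.prime_two h') (by norm_num)

theorem not_three_dvd (c : ℕ) : ¬ 3 ∣ 5^c := fun h =>
  absurd (Nat.Prime.dvd_of_dvd_pow Nat.prime_three h) (by norm_num)

theorem dvd2_of (h a b c : ℕ) (he : h = 2^(a+1) * 3^b * 5^c) : 2 ∣ h :=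
  he ▸ ⟨2^a * 3^b * 5^c, by ring⟩

theorem dvd3_of (h a b c : ℕ) (he : h = 2^a * 3^(b+1) * 5^c) : 3 ∣ h :=
  he ▸ ⟨2^a * 3^b * 5^c, by ring⟩

theorem dvd5_of (h a b c : ℕ) (he : h = 2^a * 3^b * 5^(c+1)) : 5 ∣ h :=
  he ▸ ⟨2^a * 3^b * 5^c, by ring⟩

-- A's while loop accepts exactly the 5-smooth numbers.
theorem smooth_iff : ∀ (fuel h : ℕ), 1 ≤ h → h ≤ fuel →
    (loopA fuel h = true ↔ ∃ a b c : ℕ, h = 2^a * 3^b * 5^c) := by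
  intro fuel
  induction fuel with
  | zero => intro h h1 h2; omega
  | succ fuel ih =>
    intro h h1 hle
    by_cases hle1 : h ≤ 1
    · have : h = 1 := by omega
      subst this
      simp [loopA]
      exact ⟨0, 0, 0, by norm_num⟩
    · have h2 : 2 ≤ h := by omega
      by_cases hm2 : h % 2 = 0
      · have hd : 2 ∣ h := by omega
        have hrec : loopA (fuel+1) h = loopA fuel (h/2) := by
          simp [loopA, hle1, hm2]
        rw [hrec, ih (h/2) (by omega) (by omega)]
        constructor
        · rintro ⟨a, b, c, he⟩
          refine ⟨a+1, b, c, ?_⟩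
          have hh : h = h / 2 * 2 := by omega
          rw [hh, he, pow_succ]; ring
        · rintro ⟨a, b, c, he⟩
          match a with
          | 0 => exact absurd (he ▸ hd) (by simpa using not_two_dvd b c)
          | a+1 =>
            refine ⟨a, b, c, ?_⟩
            have : h = 2^a * 3^b * 5^c * 2 := by rw [he, pow_succ]; ring
            omega
      · by_cases hm3 : h % 3 = 0
        · have hd : 3 ∣ h := by omega
          have hrec : loopA (fuel+1) h = loopA fuel (h/3) := by
            simp [loopA, hle1, hm2, hm3]
          rw [hrec, ih (h/3) (by omega) (by omega)]
          constructor
          · rintro ⟨a, b, c, he⟩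
            refine ⟨a, b+1, c, ?_⟩
            have hh : h = h / 3 * 3 := by omega
            rw [hh, he, pow_succ]; ring
          · rintro ⟨a, b, c, he⟩
            have ha : a = 0 := by
              match a with
              | 0 => rfl
              | a+1 => exact absurd (by have := dvd2_of h a b c he; omega) hm2
            subst ha
            match b with
            | 0 =>
              exfalso
              simp at he
              exact not_three_dvd c (he ▸ hd)
            | b+1 =>
              refine ⟨0, b, c, ?_⟩
              rw [pow_succ] at he
              have : 2^0 * (3^b * 3) * 5^c = 2^0 * 3^b * 5^c * 3 := by ring
              rw [this] at he
              omega
        · by_cases hm5 : h % 5 = 0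
          · have hd : 5 ∣ h := by omega
            have hrec : loopA (fuel+1) h = loopA fuel (h/5) := by
              simp [loopA, hle1, hm2, hm3, hm5]
            rw [hrec, ih (h/5) (by omega) (by omega)]
            constructor
            · rintro ⟨a, b, c, he⟩
              refine ⟨a, b, c+1, ?_⟩
              have hh : h = h / 5 * 5 := by omega
              rw [hh, he, pow_succ]; ring
            · rintro ⟨a, b, c, he⟩
              have ha : a = 0 := by
                match a with
                | 0 => rfl
                | a+1 => exact absurd (by have := dvd2_of h a b c he; omega) hm2
              have hb : b = 0 := by
                match b with
                | 0 => rfl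
                | b+1 => exact absurd (by have := dvd3_of h a b c he; omega) hm3
              subst ha; subst hb
              match c with
              | 0 => exfalso; simp at he; omega
              | c+1 =>
                refine ⟨0, 0, c, ?_⟩
                rw [pow_succ] at he
                have : 2^0 * 3^0 * (5^c * 5) = 2^0 * 3^0 * 5^c * 5 := by ring
                rw [this] at he
                omega
          · have hrec : loopA (fuel+1) h = false := by
              simp [loopA, hle1, hm2, hm3, hm5]
            rw [hrec]
            simp only [Bool.false_eq_true, false_iff]
            rintro ⟨a, b, c, he⟩
            have ha : a = 0 := by
              match a with
              | 0 => rfl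
              | a+1 => exact absurd (by have := dvd2_of h a b c he; omega) hm2
            have hb : b = 0 := by
              match b with
              | 0 => rfl
              | b+1 => exact absurd (by have := dvd3_of h a b c he; omega) hm3
            have hc : c = 0 := by
              match c with
              | 0 => rfl
              | c+1 => exact absurd (by have := dvd5_of h a b c he; omega) hm5
            subst ha; subst hb; subst hc
            simp at he
            omega

-- (a,b,c) ↦ 2^a 3^b 5^c is injective (unique factorization).
theorem inj235 {a b c a' b' c' : ℕ} (h : 2^a * 3^b * 5^c = 2^a' * 3^b' * 5^c') :
    a = a' ∧ b = b' ∧ c = c' := by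
  have h2 := congrArg (Nat.factorization · 2) h
  have h3 := congrArg (Nat.factorization · 3) h
  have h5 := congrArg (Nat.factorization · 5) h
  simp [Nat.factorization_mul, Nat.prime_two, Nat.prime_three,
    (by norm_num : Nat.Prime 5)] at h2 h3 h5
  exact ⟨h2, h3, h5⟩

-- ---- sum plumbing for B's loops ----
theorem sum_pow_shift (F : ℤ → ℤ) (q p : ℤ) (h0 : F (p * q^33) = 0) :
    ∑ k ∈ Finset.range 33, F (p * q^k) = F p + ∑ k ∈ Finset.range 33, F (q * p * q^k) := by
  have L : ∑ k ∈ Finset.range 33, F (p * q^k)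
      = (∑ k ∈ Finset.range 32, F (p * q^(k+1))) + F (p * q^0) :=
    Finset.sum_range_succ' _ 32
  have R : ∑ k ∈ Finset.range 33, F (q * p * q^k)
      = (∑ k ∈ Finset.range 32, F (q * p * q^k)) + F (q * p * q^32) :=
    Finset.sum_range_succ _ 32
  have e2 : q * p * q^32 = p * q^33 := by rw [pow_succ]; ring
  have e3 : ∑ k ∈ Finset.range 32, F (p * q^(k+1)) = ∑ k ∈ Finset.range 32, F (q * p * q^k) :=
    Finset.sum_congr rfl fun k _ => congrArg F (by rw [pow_succ]; ring)
  rw [L, R, e2, h0, add_zero, pow_zero, mul_one, e3, add_comm]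

theorem ind5_zero (n p : ℤ) (hp : 0 < p) (hpn : n < p) :
    ∑ c ∈ Finset.range 33, (if p * 5^c ≤ n then (1:ℤ) else 0) = 0 := by
  refine Finset.sum_eq_zero fun c _ => ?_
  have h1 : p ≤ p * 5^c := le_mul_of_one_le_right hp.le (one_le_pow₀ (by norm_num))
  rw [if_neg (by omega)]

theorem loop5_eq : ∀ (fuel : ℕ) (n p acc : ℤ), 0 < p → n ≤ 2^31 → (n + 1 - p).toNat < fuel →
    loop5 fuel n p acc = acc + ∑ c ∈ Finset.range 33, (if p * 5^c ≤ n then (1:ℤ) else 0) := by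
  intro fuel
  induction fuel with
  | zero => intro n p acc _ _ hf; omega
  | succ fuel ih =>
    intro n p acc hp hn hf
    by_cases hpn : p ≤ n
    · have hrec : loop5 (fuel+1) n p acc = loop5 fuel n (5*p) (acc+1) := by
        simp [loop5, hpn]
      rw [hrec, ih n (5*p) (acc+1) (by omega) hn (by omega)]
      rw [sum_pow_shift (fun x => if x ≤ n then (1:ℤ) else 0) 5 p]
      · rw [if_pos hpn]; ring
      · have h1 : (5:ℤ)^33 ≤ p * 5^33 := le_mul_of_one_le_left (by positivity) (by omega)
        have h2 : (2:ℤ)^31 < 5^33 := by norm_num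
        simp only [if_neg (by omega : ¬ p * (5:ℤ)^33 ≤ n)]
    · have hrec : loop5 (fuel+1) n p acc = acc := by simp [loop5, hpn]
      rw [hrec, ind5_zero n p hp (by omega), add_zero]

theorem ind3_zero (n p : ℤ) (hp : 0 < p) (hpn : n < p) :
    ∑ b ∈ Finset.range 33, ∑ c ∈ Finset.range 33,
      (if p * 3^b * 5^c ≤ n then (1:ℤ) else 0) = 0 := by
  refine Finset.sum_eq_zero fun b _ => ?_
  exact ind5_zero n (p * 3^b)
    (by positivity)
    (lt_of_lt_of_le hpn (le_mul_of_one_le_right hp.le (one_le_pow₀ (by norm_num))))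

theorem loop3_eq : ∀ (fuel : ℕ) (n p acc : ℤ), 0 < p → n ≤ 2^31 → (n + 1 - p).toNat < fuel →
    loop3 fuel n p acc = acc + ∑ b ∈ Finset.range 33, ∑ c ∈ Finset.range 33,
      (if p * 3^b * 5^c ≤ n then (1:ℤ) else 0) := by
  intro fuel
  induction fuel with
  | zero => intro n p acc _ _ hf; omega
  | succ fuel ih =>
    intro n p acc hp hn hf
    by_cases hpn : p ≤ n
    · have hrec : loop3 (fuel+1) n p acc = loop3 fuel n (3*p) (loop5 (n.toNat+1) n p acc) := by
        simp [loop3, hpn]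
      have hfuel5 : (n + 1 - p).toNat < n.toNat + 1 := by omega
      rw [hrec, ih n (3*p) _ (by omega) hn (by omega), loop5_eq _ n p acc hp hn hfuel5]
      rw [sum_pow_shift (fun x => ∑ c ∈ Finset.range 33, (if x * 5^c ≤ n then (1:ℤ) else 0)) 3 p]
      · ring
      · have h1 : (3:ℤ)^33 ≤ p * 3^33 := le_mul_of_one_le_left (by positivity) (by omega)
        have h2 : (2:ℤ)^31 < 3^33 := by norm_num
        exact ind5_zero n (p * 3^33) (by positivity) (by omega)
    · have hrec : loop3 (fuel+1) n p acc = acc := by simp [loop3, hpn]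
      rw [hrec, ind3_zero n p hp (by omega), add_zero]

theorem loop2_eq : ∀ (fuel : ℕ) (n p acc : ℤ), 0 < p → n ≤ 2^31 → (n + 1 - p).toNat < fuel →
    loop2 fuel n p acc = acc + ∑ a ∈ Finset.range 33, ∑ b ∈ Finset.range 33,
      ∑ c ∈ Finset.range 33, (if p * 2^a * 3^b * 5^c ≤ n then (1:ℤ) else 0) := by
  intro fuel
  induction fuel with
  | zero => intro n p acc _ _ hf; omega
  | succ fuel ih =>
    intro n p acc hp hn hf
    by_cases hpn : p ≤ n
    · have hrec : loop2 (fuel+1) n p acc = loop2 fuel n (2*p) (loop3 (n.toNat+1) n p acc) := by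
        simp [loop2, hpn]
      have hfuel3 : (n + 1 - p).toNat < n.toNat + 1 := by omega
      rw [hrec, ih n (2*p) _ (by omega) hn (by omega), loop3_eq _ n p acc hp hn hfuel3]
      rw [sum_pow_shift (fun x => ∑ b ∈ Finset.range 33, ∑ c ∈ Finset.range 33,
            (if x * 3^b * 5^c ≤ n then (1:ℤ) else 0)) 2 p]
      · ring
      · have h1 : (2:ℤ)^33 ≤ p * 2^33 := le_mul_of_one_le_left (by positivity) (by omega)
        have h2 : (2:ℤ)^31 < 2^33 := by norm_num
        exact ind3_zero n (p * 2^33) (by positivity) (by omega)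
    · have hrec : loop2 (fuel+1) n p acc = acc := by simp [loop2, hpn]
      rw [hrec]
      have : ∑ a ∈ Finset.range 33, ∑ b ∈ Finset.range 33, ∑ c ∈ Finset.range 33,
          (if p * 2^a * 3^b * 5^c ≤ n then (1:ℤ) else 0) = 0 := by
        refine Finset.sum_eq_zero fun a _ => ?_
        exact ind3_zero n (p * 2^a)
          (by positivity)
          (lt_of_lt_of_le (by omega) (le_mul_of_one_le_right hp.le (one_le_pow₀ (by norm_num))))
      rw [this, add_zero]

-- f_alt as a triple indicator sum.
theorem f_alt_eq (n : ℤ) (hn : n ≤ 2^31) :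
    f_alt n = ∑ a ∈ Finset.range 33, ∑ b ∈ Finset.range 33, ∑ c ∈ Finset.range 33,
      (if (2^a * 3^b * 5^c : ℤ) ≤ n then (1:ℤ) else 0) := by
  unfold f_alt
  rw [loop2_eq (n.toNat + 1) n 1 0 one_pos hn (by omega)]
  simp only [one_mul, zero_add]

-- f as a count over range.
theorem f_eq (n : ℤ) :
    f n = ((List.range n.toNat).countP (fun k => loopA (k+1) (k+1)) : ℤ) := by
  unfold f
  rw [PySem.List.foldl_count_if, PySem.List.pyRange_one, List.countP_map, zero_add]
  congr 1
  have : (n + 1 - 1).toNat = n.toNat := by omega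
  rw [this]
  refine List.countP_congr fun k _ => ?_
  have : ((1:ℤ) + (k:ℤ)).toNat = k + 1 := by omega
  simp [Function.comp, this]

-- List count = Finset card.
theorem countP_range_card (N : ℕ) (p : ℕ → Bool) :
    (List.range N).countP p = ((Finset.range N).filter (fun k => p k = true)).card := by
  simp [Finset.filter, Multiset.filter_coe, Multiset.range, List.countP_eq_length_filter]

-- The counting core: triples (a,b,c) with 2^a 3^b 5^c ≤ N biject with the 5-smooth
-- numbers k+1, k < N  (exponents < 33 suffice because N ≤ 2^31 < 2^33 < 3^33 < 5^33).
theorem core (N : ℕ) (hN : N ≤ 2^31) :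
    (((Finset.range 33) ×ˢ (Finset.range 33) ×ˢ (Finset.range 33)).filter
      (fun t => 2^t.1 * 3^t.2.1 * 5^t.2.2 ≤ N)).card
    = ((Finset.range N).filter (fun k => loopA (k+1) (k+1) = true)).card := by
  refine Finset.card_bij (fun t _ => 2^t.1 * 3^t.2.1 * 5^t.2.2 - 1) ?_ ?_ ?_
  · rintro ⟨a, b, c⟩ ht
    simp only [Finset.mem_filter] at ht ⊢
    have hpos : 1 ≤ 2^a * 3^b * 5^c := Nat.one_le_iff_ne_zero.2 (by positivity)
    refine ⟨Finset.mem_range.2 (by omega), ?_⟩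
    have : 2^a * 3^b * 5^c - 1 + 1 = 2^a * 3^b * 5^c := by omega
    rw [this, (smooth_iff _ _ hpos le_rfl)]
    exact ⟨a, b, c, rfl⟩
  · rintro ⟨a, b, c⟩ ht ⟨a', b', c'⟩ ht' he
    have hpos : 1 ≤ 2^a * 3^b * 5^c := Nat.one_le_iff_ne_zero.2 (by positivity)
    have hpos' : 1 ≤ 2^a' * 3^b' * 5^c' := Nat.one_le_iff_ne_zero.2 (by positivity)
    dsimp only at he
    have : 2^a * 3^b * 5^c = 2^a' * 3^b' * 5^c' := by omega
    obtain ⟨h1, h2, h3⟩ := inj235 this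
    simp [h1, h2, h3]
  · intro k hk
    simp only [Finset.mem_filter, Finset.mem_range] at hk
    obtain ⟨hkN, hsm⟩ := hk
    obtain ⟨a, b, c, he⟩ := (smooth_iff (k+1) (k+1) (by omega) le_rfl).1 hsm
    have hle : 2^a * 3^b * 5^c ≤ N := by omega
    have ha : a < 33 := by
      by_contra hcon
      have h1 : 2^33 ≤ 2^a := Nat.pow_le_pow_right (by norm_num) (by omega)
      have h2 : 2^a ≤ 2^a * 3^b * 5^c := by
        calc 2^a ≤ 2^a * 3^b := Nat.le_mul_of_pos_right _ (by positivity)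
          _ ≤ 2^a * 3^b * 5^c := Nat.le_mul_of_pos_right _ (by positivity)
      have : (2:ℕ)^31 < 2^33 := by norm_num
      omega
    have hb : b < 33 := by
      by_contra hcon
      have h1 : 3^33 ≤ 3^b := Nat.pow_le_pow_right (by norm_num) (by omega)
      have h2 : 3^b ≤ 2^a * 3^b * 5^c := by
        calc 3^b ≤ 2^a * 3^b := Nat.le_mul_of_pos_left _ (by positivity)
          _ ≤ 2^a * 3^b * 5^c := Nat.le_mul_of_pos_right _ (by positivity)
      have : (2:ℕ)^31 < 3^33 := by norm_num
      omega
    have hc : c < 33 := by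
      by_contra hcon
      have h1 : 5^33 ≤ 5^c := Nat.pow_le_pow_right (by norm_num) (by omega)
      have h2 : 5^c ≤ 2^a * 3^b * 5^c := Nat.le_mul_of_pos_left _ (by positivity)
      have : (2:ℕ)^31 < 5^33 := by norm_num
      omega
    refine ⟨⟨a, b, c⟩, ?_, ?_⟩
    · simp only [Finset.mem_filter, Finset.mem_product, Finset.mem_range]
      exact ⟨⟨ha, hb, hc⟩, by omega⟩
    · show 2^a * 3^b * 5^c - 1 = k
      omega

-- Triple indicator sum (over ℤ) = card of the triple filter.
theorem sum_eq_card (N : ℕ) :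
    (∑ a ∈ Finset.range 33, ∑ b ∈ Finset.range 33, ∑ c ∈ Finset.range 33,
      (if (2^a * 3^b * 5^c : ℕ) ≤ N then (1:ℤ) else 0))
    = ((((Finset.range 33) ×ˢ (Finset.range 33) ×ˢ (Finset.range 33)).filter
        (fun t => 2^t.1 * 3^t.2.1 * 5^t.2.2 ≤ N)).card : ℤ) := by
  rw [Finset.card_filter]
  push_cast
  rw [Finset.sum_product]
  refine Finset.sum_congr rfl fun a _ => ?_
  rw [Finset.sum_product]

-- ===== VERDICT (by name: the statement is the Claim_ definition above) =====
theorem f_spec : Claim_equal_f := by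
  intro n hdom
  unfold Spec_f
  have hn : n ≤ 2^31 := by
    unfold Dom_f pvDomInt at hdom
    simp at hdom
    omega
  rw [f_eq, f_alt_eq n hn]
  by_cases hneg : n < 0
  · have h0 : n.toNat = 0 := by omega
    rw [h0]
    simp only [List.range_zero, List.countP_nil, Nat.cast_zero]
    symm
    refine Finset.sum_eq_zero fun a _ => Finset.sum_eq_zero fun b _ => Finset.sum_eq_zero fun c _ => ?_
    have : (0:ℤ) < 2^a * 3^b * 5^c := by positivity
    rw [if_neg (by omega)]
  · have h0 : 0 ≤ n := by omega
    have hcond : ∀ a b c : ℕ, ((2^a * 3^b * 5^c : ℤ) ≤ n ↔ (2^a * 3^b * 5^c : ℕ) ≤ n.toNat) := by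
      intro a b c
      have hc : ((2^a * 3^b * 5^c : ℕ) : ℤ) = (2^a * 3^b * 5^c : ℤ) := by push_cast; ring
      rw [← hc]
      exact (Int.le_toNat h0).symm
    have hsum : (∑ a ∈ Finset.range 33, ∑ b ∈ Finset.range 33, ∑ c ∈ Finset.range 33,
        (if (2^a * 3^b * 5^c : ℤ) ≤ n then (1:ℤ) else 0))
        = ∑ a ∈ Finset.range 33, ∑ b ∈ Finset.range 33, ∑ c ∈ Finset.range 33,
        (if (2^a * 3^b * 5^c : ℕ) ≤ n.toNat then (1:ℤ) else 0) := by
      refine Finset.sum_congr rfl fun a _ => Finset.sum_congr rfl fun b _ =>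
        Finset.sum_congr rfl fun c _ => ?_
      rw [if_congr (hcond a b c) rfl rfl]
    rw [hsum, sum_eq_card, core n.toNat (by omega), countP_range_card]
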